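-- pv_equiv track=rewrite | github.com/ectrimble20/PythonExerciseCode | DailyProgrammer/Challenge_353_easy.py | find_closest_string
-- ===== SOURCE A (Python) =====
-- def find_closest_string(lines: list):
--     closest_line = ""
--     closest_line_total = 0
--     for line in lines:
--         line_total = 0
--         for s in lines:
--             if line != s:
--                 for i, c in enumerate(s):
--                     if c == line[i]:
--                         line_total += 1
--         if line_total > closest_line_total:
--             closest_line = line
--             closest_line_total = line_total
--     return closest_line
-- ===== SOURCE B (Python) =====
-- def find_closest_string(lines: list):
--     # One pass over the columns (zip of the lines) builds per-column character
--     # frequencies; a line's score is the sum of the frequencies of its own chars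
--     # minus the contribution of the lines equal to it (which A skips).
--     col_counts = []
--     for col in zip(*lines):
--         d = {}
--         for c in col:
--             d[c] = d.get(c, 0) + 1
--         col_counts.append(d)
--     dup = {}
--     for s in lines:
--         dup[s] = dup.get(s, 0) + 1
--     best, best_total = "", 0
--     for s in lines:
--         total = sum(col_counts[i].get(c, 0) for i, c in enumerate(s)) - dup[s] * len(s)
--         if total > best_total:
--             best, best_total = s, total
--     return best
-- ===== Notes on version B (the rewrite author's own statement) =====
-- stated objective: faster
-- what changed: Replaces the all-pairs position-wise comparison with a single pass that builds a per-(position,char) frequency table and a string-multiplicity table, so each line's score is a sum of table lookups minus its own duplicates' contribution.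
import Mathlib
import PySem

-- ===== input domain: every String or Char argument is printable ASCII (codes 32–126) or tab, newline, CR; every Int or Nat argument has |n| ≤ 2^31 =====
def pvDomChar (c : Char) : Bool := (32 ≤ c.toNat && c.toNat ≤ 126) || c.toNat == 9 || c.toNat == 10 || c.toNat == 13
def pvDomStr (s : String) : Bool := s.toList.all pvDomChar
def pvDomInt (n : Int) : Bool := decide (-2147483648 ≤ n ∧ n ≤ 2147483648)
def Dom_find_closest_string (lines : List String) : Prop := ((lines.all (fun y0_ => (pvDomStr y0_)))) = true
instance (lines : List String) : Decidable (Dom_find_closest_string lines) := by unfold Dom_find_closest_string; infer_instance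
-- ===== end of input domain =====

-- B replaces A's all-pairs comparison by per-(position,char) frequency tables built in one pass (asymptotically faster); equal on lists of equal-length lines (A raises IndexError otherwise).


-- ===== PORT A =====
def find_closest_string (lines : List String) : String :=
  (lines.foldl (fun (st : String × Int) ln =>
    let ln_total : Int := lines.foldl (fun t s =>
      if ln ≠ s then
        (PySem.List.enumerate s.toList).foldl (fun t ic =>
          match PySem.Str.pyGet? ln ic.1 with   -- ln[i]; none = IndexError, excluded by Pre_
          | some ch => if ic.2 = ch then t + 1 else t
          | none => t) t
      else t) 0
    if ln_total > st.2 then (ln, ln_total) else st) ("", 0)).1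

-- ===== PORT B =====
-- zip(*xss): Python's zip over all rows — the transpose truncated to the shortest
-- row ([] for the empty call). Ported by hand; exact (the getD default is never
-- used: j ranges below every row's length).
def pvZipStar (xss : List (List Char)) : List (List Char) :=
  (List.range (((xss.map List.length).min?).getD 0)).map
    (fun j => xss.map (fun xs => xs.getD j ' '))

def find_closest_string_alt (lines : List String) : String :=
  let col_counts : List (PySem.Dict Char Int) :=
    (pvZipStar (lines.map String.toList)).foldl (fun acc col =>
      acc ++ [col.foldl (fun d c => d.insert c (d.getD c 0 + 1)) PySem.Dict.empty]) []
  let dup : PySem.Dict String Int := lines.foldl (fun d s =>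
    d.insert s (d.getD s 0 + 1)) PySem.Dict.empty
  (lines.foldl (fun (st : String × Int) s =>
    -- col_counts[i] raises IndexError for i ≥ len(col_counts): excluded by Pre_,
    -- so the pyGetD default is never used; dup[s]: s is always a key, = getD s 0
    let total : Int := ((PySem.List.enumerate s.toList).foldl (fun t ic =>
        t + (PySem.List.pyGetD col_counts ic.1 PySem.Dict.empty).getD ic.2 0) 0)
      - dup.getD s 0 * (s.toList.length : Int)
    if total > st.2 then (s, total) else st) ("", 0)).1

-- ===== PRECONDITION & SPEC =====
-- A indexes every ln at every position of every other ln, so it raises IndexError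
-- as soon as two lines have different lengths; Pre_ is exactly "all lines have equal length".
def Pre_find_closest_string (lines : List String) : Prop :=
  ∀ a ∈ lines, ∀ b ∈ lines, a.toList.length = b.toList.length
instance (lines : List String) : Decidable (Pre_find_closest_string lines) := by
  unfold Pre_find_closest_string; infer_instance
def pvWitness_find_closest_string : List String := ["abc", "abd", "xbd"]

def Spec_find_closest_string (lines : List String) (out : String) : Prop := out = find_closest_string_alt lines
instance (lines : List String) (out : String) : Decidable (Spec_find_closest_string lines out) := by unfold Spec_find_closest_string; infer_instance

-- ===== CLAIM (what is proved, stated in full; the proofs are below) =====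
def Claim_equal_find_closest_string : Prop := ∀ (lines : List String), Dom_find_closest_string lines → Pre_find_closest_string lines → Spec_find_closest_string lines (find_closest_string lines)

-- ===== LEMMAS AND PROOFS =====

-- A's per-opponent match count for opponent s (positions indexed by s, looked up in ln).
def pvRowA (lnL sL : List Char) : Int :=
  ((PySem.List.enumerate sL).map (fun ic => if lnL[ic.1.toNat]? = some ic.2 then (1:Int) else 0)).sum
-- B's per-opponent match count (positions indexed by ln, looked up in s).
def pvRowB (lnL sL : List Char) : Int :=
  ((PySem.List.enumerate lnL).map (fun ic => if sL[ic.1.toNat]? = some ic.2 then (1:Int) else 0)).sum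

theorem pv_sum_swap {a b : Type} (K : List a) (L : List b) (f : a → b → Int) :
    (K.map (fun x => (L.map (fun y => f x y)).sum)).sum
      = (L.map (fun y => (K.map (fun x => f x y)).sum)).sum := by
  induction L with
  | nil => simp
  | cons y ys ih =>
    simp only [List.map_cons, List.sum_cons]
    rw [← ih, ← PySem.List.sum_map_add_int]

theorem pv_sum_map_sub {b : Type} (L : List b) (f g : b → Int) :
    (L.map (fun x => f x - g x)).sum = (L.map f).sum - (L.map g).sum := by
  induction L with
  | nil => simp
  | cons y ys ih => simp only [List.map_cons, List.sum_cons, ih]; ring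

theorem pv_dup_getD (lines : List String) (ln : String) :
    ((lines.foldl (fun d ln => d.insert ln (d.getD ln 0 + 1)) PySem.Dict.empty).getD ln 0)
      = (lines.count ln : Int) := by
  rw [PySem.Dict.foldl_insert_getD_add_one_eq_counter, PySem.Dict.getD_counter]

theorem pv_count_mul (lines : List String) (ln : String) (L : Int) :
    (lines.count ln : Int) * L = (lines.map (fun s => if s = ln then L else 0)).sum := by
  induction lines with
  | nil => simp
  | cons s rest ih =>
    rw [List.count_cons]
    simp only [List.map_cons, List.sum_cons, ← ih]
    by_cases h : s = ln
    · subst h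
      simp only [beq_self_eq_true, if_true]
      push_cast; ring
    · simp only [beq_iff_eq, if_neg h]
      push_cast; ring

theorem pv_innerA (ln : String) (sL : List Char) (t : Int) :
    (PySem.List.enumerate sL).foldl (fun t ic =>
        match PySem.Str.pyGet? ln ic.1 with
        | some ch => if ic.2 = ch then t + 1 else t
        | none => t) t
    = t + pvRowA ln.toList sL := by
  unfold pvRowA
  rw [PySem.List.foldl_congr_mem _ _
      (fun acc ic => acc + (if ln.toList[ic.1.toNat]? = some ic.2 then (1:Int) else 0)) t ?_]
  · exact PySem.List.foldl_add _ _ t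
  · intro acc ic hic
    rw [PySem.List.mem_enumerate_iff] at hic
    obtain ⟨k, hk, rfl⟩ := hic
    simp only [zero_add, PySem.Str.pyGet?_natCast, Int.toNat_natCast]
    rcases hg : ln.toList[k]? with _ | ch
    · simp
    · simp only []
      by_cases hc : sL[k] = ch
      · simp [hc]
      · simp [hc, Ne.symm hc]

theorem pv_scoreA (lines : List String) (ln : String) :
    lines.foldl (fun t s =>
      if ln ≠ s then
        (PySem.List.enumerate s.toList).foldl (fun t ic =>
          match PySem.Str.pyGet? ln ic.1 with
          | some ch => if ic.2 = ch then t + 1 else t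
          | none => t) t
      else t) 0
    = (lines.map (fun s => if ln ≠ s then pvRowA ln.toList s.toList else 0)).sum := by
  rw [PySem.List.foldl_congr_mem _ _
      (fun t s => t + (if ln ≠ s then pvRowA ln.toList s.toList else 0)) 0 ?_]
  · rw [PySem.List.foldl_add]; ring
  · intro acc s _
    beta_reduce
    by_cases h : ln = s
    · rw [if_neg (by simp [h]), if_neg (by simp [h]), add_zero]
    · rw [if_pos h, if_pos h, pv_innerA]

theorem pv_rowB_self (lnL : List Char) : pvRowB lnL lnL = (lnL.length : Int) := by
  unfold pvRowB
  rw [List.map_congr_left (g := fun _ => (1:Int)) ?_]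
  · rw [PySem.List.sum_map_const_int, PySem.List.length_enumerate]; ring
  · intro ic hic
    rw [PySem.List.mem_enumerate_iff] at hic
    obtain ⟨k, hk, rfl⟩ := hic
    simp [List.getElem?_eq_getElem hk]

theorem pv_rowB_eq_rowA (ln s : String) (hlen : s.toList.length = ln.toList.length) :
    pvRowB ln.toList s.toList = pvRowA ln.toList s.toList := by
  unfold pvRowA pvRowB
  rw [PySem.List.enumerate_eq_map_pyRange ln.toList 'a',
      PySem.List.enumerate_eq_map_pyRange s.toList 'a', List.map_map, List.map_map,
      show PySem.List.len s.toList = PySem.List.len ln.toList by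
        simp [PySem.List.len_eq, hlen]]
  refine congrArg List.sum (List.map_congr_left ?_)
  intro j hj
  rw [PySem.List.mem_pyRange_one] at hj
  obtain ⟨hj0, hj1⟩ := hj
  have hjlen : j < (ln.toList.length : Int) := by
    simpa [PySem.List.len_eq] using hj1
  have hjslen : j < (s.toList.length : Int) := by omega
  have hjn : j.toNat < ln.toList.length := by omega
  have hjs : j.toNat < s.toList.length := by omega
  simp only [Function.comp_apply,
    PySem.List.pyGetD_eq_getElem ln.toList 'a' hj0 hjlen,
    PySem.List.pyGetD_eq_getElem s.toList 'a' hj0 hjslen,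
    List.getElem?_eq_getElem hjn, List.getElem?_eq_getElem hjs,
    Option.some.injEq]
  by_cases h : s.toList[j.toNat] = ln.toList[j.toNat]
  · simp [h]
  · simp [h, Ne.symm h]

theorem pv_colcounts (cols : List (List Char)) :
    cols.foldl (fun acc col =>
      acc ++ [col.foldl (fun d c => d.insert c (d.getD c 0 + 1)) PySem.Dict.empty]) []
    = cols.map (fun col => PySem.Dict.counter col) := by
  rw [PySem.List.foldl_append_singleton_eq_map]
  simp [PySem.Dict.foldl_insert_getD_add_one_eq_counter]

theorem pv_foldl_min_const (t : List Nat) (L : Nat) (h : ∀ x ∈ t, x = L) :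
    t.foldl min L = L := by
  induction t with
  | nil => rfl
  | cons b bs ih =>
    have hb := h b (by simp)
    subst hb
    simp only [List.foldl_cons, min_self]
    exact ih (fun x hx => h x (by simp [hx]))

theorem pv_count_map_int (lines : List String) (k : Nat) (c : Char)
    (hk : ∀ s ∈ lines, k < s.toList.length) :
    ((List.count c ((lines.map String.toList).map (fun xs => xs.getD k ' ')) : Nat) : Int)
      = (lines.map (fun s => if s.toList[k]? = some c then (1:Int) else 0)).sum := by
  induction lines with
  | nil => simp
  | cons s rest ih =>
    have hks := hk s (by simp)
    have ih' := ih (fun x hx => hk x (by simp [hx]))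
    simp only [List.map_cons, List.count_cons, List.sum_cons, ← ih']
    rw [List.getD_eq_getElem _ _ hks, List.getElem?_eq_getElem hks]
    by_cases h : s.toList[k] = c
    · simp [h]; ring
    · simp [h, beq_iff_eq]

theorem pv_col_getD (lines : List String) (ln : String) (hmem : ln ∈ lines)
    (hlen : ∀ s ∈ lines, s.toList.length = ln.toList.length)
    (k : Nat) (hk : k < ln.toList.length) (c : Char) :
    (PySem.List.pyGetD
        ((pvZipStar (lines.map String.toList)).map (fun col => PySem.Dict.counter col))
        ((k:Int)) PySem.Dict.empty).getD c 0
      = (lines.map (fun s => if s.toList[k]? = some c then (1:Int) else 0)).sum := by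
  unfold pvZipStar
  have hmin : ((((lines.map String.toList).map List.length).min?).getD 0)
      = ln.toList.length := by
    rcases h : (lines.map String.toList).map List.length with _ | ⟨a, t⟩
    · exfalso
      have : lines = [] := by
        rcases lines with _ | _
        · rfl
        · simp at h
      subst this; simp at hmem
    · have hall : ∀ x ∈ ((lines.map String.toList).map List.length), x = ln.toList.length := by
        intro x hx
        simp only [List.map_map, List.mem_map] at hx
        obtain ⟨s, hs, rfl⟩ := hx
        exact hlen s hs
      have ha : a = ln.toList.length := hall a (by rw [h]; simp)
      subst ha
      rw [List.min?_cons']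
      simp only [Option.getD_some]
      exact pv_foldl_min_const t _ (fun x hx => hall x (by rw [h]; simp [hx]))
  rw [hmin, List.map_map, PySem.List.pyGetD_natCast]
  rw [List.getD_eq_getElem?_getD, List.getElem?_map, List.getElem?_range hk]
  simp only [Option.map_some, Option.getD_some, Function.comp_apply]
  rw [PySem.Dict.getD_counter]
  exact pv_count_map_int lines k c (fun s hs => (hlen s hs) ▸ hk)

theorem pv_rowSum (lines : List String) (ln : String) (hmem : ln ∈ lines)
    (hlen : ∀ s ∈ lines, s.toList.length = ln.toList.length) :
    ((PySem.List.enumerate ln.toList).map (fun ic =>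
        (PySem.List.pyGetD
          ((pvZipStar (lines.map String.toList)).map (fun col => PySem.Dict.counter col))
          ic.1 PySem.Dict.empty).getD ic.2 0)).sum
      = (lines.map (fun s => pvRowB ln.toList s.toList)).sum := by
  rw [List.map_congr_left (g := fun ic =>
      (lines.map (fun s => if s.toList[ic.1.toNat]? = some ic.2 then (1:Int) else 0)).sum) ?_]
  · rw [pv_sum_swap]
    exact congrArg List.sum (List.map_congr_left (fun s _ => rfl))
  · intro ic hic
    rw [PySem.List.mem_enumerate_iff] at hic
    obtain ⟨k, hk, rfl⟩ := hic
    simp only [zero_add, Int.toNat_natCast]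
    exact pv_col_getD lines ln hmem hlen k hk _

theorem pv_score (lines : List String) (ln : String) (hmem : ln ∈ lines)
    (hlen : ∀ s ∈ lines, s.toList.length = ln.toList.length) :
    (lines.map (fun s => if ln ≠ s then pvRowA ln.toList s.toList else 0)).sum
    = ((PySem.List.enumerate ln.toList).map (fun ic =>
        (PySem.List.pyGetD
          ((pvZipStar (lines.map String.toList)).map (fun col => PySem.Dict.counter col))
          ic.1 PySem.Dict.empty).getD ic.2 0)).sum
      - (lines.count ln : Int) * (ln.toList.length : Int) := by
  rw [pv_rowSum lines ln hmem hlen, pv_count_mul, ← pv_sum_map_sub]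
  refine congrArg List.sum (List.map_congr_left ?_)
  intro s hs
  by_cases h : s = ln
  · subst h; simp [pv_rowB_self]
  · rw [if_neg h, if_pos (fun he => h he.symm), sub_zero,
        pv_rowB_eq_rowA _ _ (hlen s hs)]

-- ===== VERDICT (by name: the statement is the Claim_ definition above) =====
theorem find_closest_string_spec : Claim_equal_find_closest_string := by
  intro lines _ hpre
  show find_closest_string lines = find_closest_string_alt lines
  unfold find_closest_string find_closest_string_alt
  refine congrArg Prod.fst ?_
  apply PySem.List.foldl_congr_mem
  intro st ln hln
  have hscore :
      lines.foldl (fun t s =>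
        if ln ≠ s then
          (PySem.List.enumerate s.toList).foldl (fun t ic =>
            match PySem.Str.pyGet? ln ic.1 with
            | some ch => if ic.2 = ch then t + 1 else t
            | none => t) t
        else t) 0
      = ((PySem.List.enumerate ln.toList).foldl (fun t ic =>
          t + (PySem.List.pyGetD
            ((pvZipStar (lines.map String.toList)).foldl (fun acc col =>
              acc ++ [col.foldl (fun d c => d.insert c (d.getD c 0 + 1)) PySem.Dict.empty]) [])
            ic.1 PySem.Dict.empty).getD ic.2 0) 0)
        - (lines.foldl (fun d s => d.insert s (d.getD s 0 + 1)) PySem.Dict.empty).getD ln 0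
          * (ln.toList.length : Int) := by
    rw [pv_scoreA, pv_dup_getD, pv_colcounts, PySem.List.foldl_add, zero_add]
    exact pv_score lines ln hln (fun s hs => hpre s hs ln hln)
  simp only [hscore]
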